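-- pv_equiv track=rewrite | github.com/Randers-Kommune-Digitalisering/streamlit-jobindsats-dashboard | src/graphs/UUR.py | last_consecutive_years
-- ===== SOURCE A (Python) =====
-- def last_consecutive_years(years: list[int], max_years: int = 3) -> list[int]:
--     if not years:
--         return []
--     ys = sorted(set(int(y) for y in years))
--     out = [ys[-1]]  # latest
--     while len(out) < max_years:
--         nxt = out[-1] - 1
--         if nxt in ys:
--             out.append(nxt)
--         else:
--             break
--     return out
-- ===== SOURCE B (Python) =====
-- def last_consecutive_years(years: list[int], max_years: int = 3) -> list[int]:
--     ys = sorted(set(years), reverse=True)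
--     if not ys:
--         return []
--     out = [ys[0]]
--     for y in ys[1:]:
--         if len(out) >= max_years:
--             break
--         if y == out[-1] - 1:
--             out.append(y)
--         else:
--             break
--     return out
-- ===== Notes on version B (the rewrite author's own statement) =====
-- stated objective: simpler
-- what changed: B sorts the unique years descending once and walks adjacent elements forward (append while the next element is exactly previous-1), instead of A's while-loop that computes each candidate value and probes it with a membership test against the sorted list.
import Mathlib
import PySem

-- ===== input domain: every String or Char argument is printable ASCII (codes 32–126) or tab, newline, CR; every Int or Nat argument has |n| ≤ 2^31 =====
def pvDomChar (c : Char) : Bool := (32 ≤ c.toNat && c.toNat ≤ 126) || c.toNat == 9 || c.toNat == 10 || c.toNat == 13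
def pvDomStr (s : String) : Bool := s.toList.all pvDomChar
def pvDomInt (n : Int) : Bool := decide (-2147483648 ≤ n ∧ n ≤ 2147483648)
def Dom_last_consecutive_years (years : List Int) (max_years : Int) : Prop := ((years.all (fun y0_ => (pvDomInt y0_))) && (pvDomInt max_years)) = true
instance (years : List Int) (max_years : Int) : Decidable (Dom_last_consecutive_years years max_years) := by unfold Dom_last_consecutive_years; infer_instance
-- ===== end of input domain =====

-- B rewrites A's while-loop of membership probes (`nxt in ys`) as one adjacent forward
-- walk over the unique years pre-sorted DESCENDING; objective: simpler (no repeated scans).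

-- ===== PORT A =====
-- the while-loop: appends out[-1]-1 while it is a member of ys and len(out) < max_years
def lastA_loop (ys : List Int) (max_years : Int) (out : List Int) : List Int :=
  if out.length < max_years then
    let nxt := (PySem.List.pyGet? out (-1)).getD 0 - 1   -- out[-1] - 1 (out is never empty)
    if nxt ∈ ys then lastA_loop ys max_years (out ++ [nxt]) else out
  else out
termination_by (max_years - out.length).toNat
decreasing_by simp; omega

def last_consecutive_years (years : List Int) (max_years : Int) : List Int :=
  if years = [] then []
  else
    -- int(y) is the identity on ints, so the generator is years itself
    let ys := PySem.List.sorted (PySem.Set.ofList years) (fun x => x) false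
    let out := [(PySem.List.pyGet? ys (-1)).getD 0]      -- [ys[-1]] (ys nonempty here)
    lastA_loop ys max_years out

-- ===== PORT B =====
-- for y in ys[1:]: break on the cap, append while y == out[-1]-1, else break
def lastB_loop (rest : List Int) (max_years : Int) (out : List Int) : List Int :=
  match rest with
  | [] => out
  | y :: t =>
    if max_years ≤ out.length then out                    -- if len(out) >= max_years: break
    else if y = (PySem.List.pyGet? out (-1)).getD 0 - 1 then lastB_loop t max_years (out ++ [y])
    else out

def last_consecutive_years_alt (years : List Int) (max_years : Int) : List Int :=
  match PySem.List.sorted (PySem.Set.ofList years) (fun x => x) true with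
  | [] => []                                              -- if not ys: return []
  | m :: rest => lastB_loop rest max_years [m]            -- out = [ys[0]]; loop over ys[1:]

-- ===== PRECONDITION & SPEC =====
def Spec_last_consecutive_years (years : List Int) (max_years : Int) (out : List Int) : Prop := out = last_consecutive_years_alt years max_years
instance (years : List Int) (max_years : Int) (out : List Int) : Decidable (Spec_last_consecutive_years years max_years out) := by unfold Spec_last_consecutive_years; infer_instance

-- ===== CLAIM (what is proved, stated in full; the proofs are below) =====
def Claim_equal_last_consecutive_years : Prop := ∀ (years : List Int) (max_years : Int), Dom_last_consecutive_years years max_years → Spec_last_consecutive_years years max_years (last_consecutive_years years max_years)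

-- ===== LEMMAS AND PROOFS =====

-- out[-1] of a nonempty list is its last element
theorem pv_last_get (out : List Int) (h : out ≠ []) :
    (PySem.List.pyGet? out (-1)).getD 0 = out.getLast h := by
  rw [PySem.List.pyGet?_neg_one, List.getLast?_eq_some_getLast h]
  rfl

-- the two loops agree whenever `rest` lists, strictly descending, exactly the
-- elements of `ys` below the current last element of `out`
theorem pv_loop_eq (ys : List Int) (max_years : Int) :
    ∀ (rest out : List Int) (h : out ≠ []),
      rest.Pairwise (fun a b => b < a) →
      (∀ x, (x ∈ ys ∧ x < out.getLast h) ↔ x ∈ rest) →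
      lastA_loop ys max_years out = lastB_loop rest max_years out := by
  intro rest
  induction rest with
  | nil =>
    intro out h _ hmem
    unfold lastA_loop lastB_loop
    by_cases h1 : (out.length : Int) < max_years
    · have hnot : ((PySem.List.pyGet? out (-1)).getD 0 - 1) ∉ ys := by
        intro hc
        have := (hmem _).mp ⟨hc, by rw [pv_last_get out h]; omega⟩
        simp at this
      simp [h1, hnot]
    · simp [h1]
  | cons y t ih =>
    intro out h hpw hmem
    have hlast := pv_last_get out h
    have hy : y ∈ ys ∧ y < out.getLast h := (hmem y).mpr (by simp)
    unfold lastA_loop lastB_loop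
    by_cases h1 : out.length < max_years
    · simp only [h1, if_true]
      have h2 : ¬ max_years ≤ out.length := by omega
      simp only [h2, if_false]
      by_cases hyeq : y = (PySem.List.pyGet? out (-1)).getD 0 - 1
      · -- y is exactly out[-1]-1: both append and continue
        have hny : ((PySem.List.pyGet? out (-1)).getD 0 - 1) ∈ ys := hyeq ▸ hy.1
        simp only [hny, if_true, hyeq, if_true]
        rw [← hyeq]
        have hne : out ++ [y] ≠ [] := by simp
        refine ih (out ++ [y]) hne (List.Pairwise.of_cons hpw) ?_
        have hlast' : (out ++ [y]).getLast hne = y := by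
          simp
        intro x
        rw [hlast']
        constructor
        · rintro ⟨hxy, hxl⟩
          have hmt : x ∈ y :: t := (hmem x).mp ⟨hxy, by rw [hlast, hyeq] at *; omega⟩
          rw [List.mem_cons] at hmt
          rcases hmt with rfl | hxt
          · omega
          · exact hxt
        · intro hxt
          have hx : x ∈ ys ∧ x < out.getLast h := (hmem x).mpr (by simp [hxt])
          refine ⟨hx.1, ?_⟩
          exact (List.pairwise_cons.mp hpw).1 x hxt
      · -- y < out[-1]-1: out[-1]-1 is in no list element, both stop
        have hlt : y < (PySem.List.pyGet? out (-1)).getD 0 - 1 := by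
          rw [hlast]; rcases hy with ⟨_, hyl⟩
          rw [hlast] at hyeq; omega
        have hnot : ((PySem.List.pyGet? out (-1)).getD 0 - 1) ∉ ys := by
          intro hc
          have hmt : ((PySem.List.pyGet? out (-1)).getD 0 - 1) ∈ y :: t :=
            (hmem _).mp ⟨hc, by rw [hlast]; omega⟩
          rw [List.mem_cons] at hmt
          rcases hmt with heq | ht
          · omega
          · have := (List.pairwise_cons.mp hpw).1 _ ht; omega
        simp only [hnot, if_false, hyeq, if_false]
    · simp only [h1, if_false]
      have h2 : max_years ≤ out.length := by omega
      simp only [h2, if_true]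

-- sorted(set(xs), reverse=True) is the reverse of sorted(set(xs))
theorem pv_desc_eq_reverse (years : List Int) :
    PySem.List.sorted (PySem.Set.ofList years) (fun x => x) true
      = (PySem.List.sorted (PySem.Set.ofList years) (fun x => x) false).reverse := by
  apply PySem.List.sorted_rev_eq_of_perm_of_pairwise_gt
  · exact (List.reverse_perm _).trans (PySem.List.sorted_perm _ _ _)
  · rw [List.pairwise_reverse]
    exact PySem.List.sorted_ofList_pairwise_lt years

-- ===== VERDICT (by name: the statement is the Claim_ definition above) =====
theorem last_consecutive_years_spec : Claim_equal_last_consecutive_years := by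
  intro years max_years _
  unfold Spec_last_consecutive_years last_consecutive_years last_consecutive_years_alt
  by_cases hnil : years = []
  · subst hnil; simp [PySem.List.sorted, PySem.Set.ofList]
  · simp only [hnil, if_false]
    set asc := PySem.List.sorted (PySem.Set.ofList years) (fun x => x) false with hasc
    have hascne : asc ≠ [] := by
      rw [hasc, Ne, PySem.List.sorted_eq_nil_iff]
      intro hc
      rcases List.exists_mem_of_ne_nil years hnil with ⟨y, hy⟩
      have := (PySem.Set.mem_ofList years y).mpr hy
      simp [hc] at this
    rw [pv_desc_eq_reverse years, ← hasc]
    have hpwasc : asc.Pairwise (· < ·) := PySem.List.sorted_ofList_pairwise_lt years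
    -- asc.reverse = m :: rest with m = asc.getLast
    obtain ⟨m, rest, hrev⟩ : ∃ m rest, asc.reverse = m :: rest := by
      cases hr : asc.reverse with
      | nil => exact absurd (by simpa using hr) hascne
      | cons a b => exact ⟨a, b, rfl⟩
    rw [hrev]
    have hm : (PySem.List.pyGet? asc (-1)).getD 0 = m := by
      rw [PySem.List.pyGet?_neg_one, ← List.head?_reverse, hrev]
      rfl
    rw [hm]
    have hpwrev : (m :: rest).Pairwise (fun a b => b < a) := by
      rw [← hrev, List.pairwise_reverse]; exact hpwasc
    apply pv_loop_eq asc max_years rest [m] (by simp)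
    · exact (List.pairwise_cons.mp hpwrev).2
    · intro x
      have hmemrev : x ∈ asc ↔ x = m ∨ x ∈ rest := by
        rw [← List.mem_reverse, hrev]; simp
      simp only [List.getLast_singleton]
      constructor
      · rintro ⟨hxa, hxm⟩
        rcases hmemrev.mp hxa with rfl | hr
        · omega
        · exact hr
      · intro hxr
        refine ⟨hmemrev.mpr (Or.inr hxr), ?_⟩
        exact (List.pairwise_cons.mp hpwrev).1 x hxr
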